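-- pv_equiv track=rewrite | github.com/Teleinfrastructure-Research-Lab/gazebo-sionna-pipeline | rt_out/scripts/exp_run_semantic_ablation.py | wide_feature_columns_from_header
-- ===== SOURCE A (Python) =====
-- class SemanticAblationError(RuntimeError):
--     pass
--
-- def wide_feature_columns_from_header(header: list[str]) -> dict[str, list[str]]:
--     # Wide mode is intentionally diagnostic: include all discovered feature
--     # columns by prefix so we can inspect how broader feature families behave.
--     geometry = sorted(column for column in header if column.startswith("geom_"))
--     material = sorted(column for column in header if column.startswith("mat_"))
--     semantic = sorted(column for column in header if column.startswith("sem_"))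
--     object_aware = sorted(column for column in header if column.startswith("obj_"))
--     if not geometry:
--         raise SemanticAblationError("No geometry feature columns were found")
--     return {
--         "majority_baseline": [],
--         "geometry_only": geometry,
--         "geometry_material": geometry + material,
--         "geometry_semantic": geometry + semantic,
--         "full_object_aware": geometry + material + semantic + object_aware,
--     }
-- ===== SOURCE B (Python) =====
-- class SemanticAblationError(RuntimeError):
--     pass
--
--
-- def wide_feature_columns_from_header(header):
--     # Sort the whole header once up front: a stable single pass over the sorted
--     # list then fills every prefix bucket already in sorted order (no per-bucket
--     # sorts), dispatching each column through a dict keyed by its sliced prefix.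
--     buckets = {"geom_": [], "mat_": [], "sem_": [], "obj_": []}
--     for column in sorted(header):
--         for n in (5, 4):
--             bucket = buckets.get(column[:n])
--             if bucket is not None:
--                 bucket.append(column)
--                 break
--     geometry = buckets["geom_"]
--     if not geometry:
--         raise SemanticAblationError("No geometry feature columns were found")
--     material = buckets["mat_"]
--     semantic = buckets["sem_"]
--     object_aware = buckets["obj_"]
--     return {
--         "majority_baseline": [],
--         "geometry_only": geometry,
--         "geometry_material": geometry + material,
--         "geometry_semantic": geometry + semantic,
--         "full_object_aware": geometry + material + semantic + object_aware,
--     }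
-- ===== Notes on version B (the rewrite author's own statement) =====
-- stated objective: alternative
-- what changed: A filters header four times and sorts each bucket; B sorts the whole header once and then fills the buckets in a single stable pass that dispatches each column through a dict keyed by its sliced prefix (column[:5]/column[:4]), so no per-bucket sorting or filtering remains.
import Mathlib
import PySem

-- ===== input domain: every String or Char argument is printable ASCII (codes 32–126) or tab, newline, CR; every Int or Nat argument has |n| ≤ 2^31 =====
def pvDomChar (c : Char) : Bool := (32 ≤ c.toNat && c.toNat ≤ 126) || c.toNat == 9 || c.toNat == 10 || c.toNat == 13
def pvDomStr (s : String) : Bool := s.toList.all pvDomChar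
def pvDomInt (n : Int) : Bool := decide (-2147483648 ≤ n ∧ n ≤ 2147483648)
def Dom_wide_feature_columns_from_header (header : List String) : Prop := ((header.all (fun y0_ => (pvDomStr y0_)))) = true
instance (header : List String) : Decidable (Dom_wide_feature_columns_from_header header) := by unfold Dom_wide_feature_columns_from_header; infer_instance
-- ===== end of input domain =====

-- B sorts the header once and fills all four prefix buckets in a single stable
-- pass dispatching each column via a dict keyed by its sliced prefix, instead of
-- A's four filtered scans each followed by its own sort (alternative, same cost).

-- ===== PORT A =====
-- literal port of A: four filter+sorted comprehensions, then the dict.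
-- The 'raise SemanticAblationError' branch (geometry empty) is excluded by Pre_;
-- the port returns [] there (no value of the type exists in Python).
def wide_feature_columns_from_header (header : List String) : List (String × List String) :=
  let geometry := PySem.List.sorted (header.filter (fun c => PySem.Str.startswith c "geom_")) (fun x => x) false
  let material := PySem.List.sorted (header.filter (fun c => PySem.Str.startswith c "mat_")) (fun x => x) false
  let semantic := PySem.List.sorted (header.filter (fun c => PySem.Str.startswith c "sem_")) (fun x => x) false
  let object_aware := PySem.List.sorted (header.filter (fun c => PySem.Str.startswith c "obj_")) (fun x => x) false
  if geometry = [] then []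
  else
    [("majority_baseline", []),
     ("geometry_only", geometry),
     ("geometry_material", geometry ++ material),
     ("geometry_semantic", geometry ++ semantic),
     ("full_object_aware", geometry ++ material ++ semantic ++ object_aware)]

-- ===== PORT B =====
-- B's loop body: try the dict of buckets with column[:5], then column[:4]
-- (the 'for n in (5, 4): … break' loop, unrolled to its two iterations).
def pvDispatch (d : PySem.Dict String (List String)) (c : String) : PySem.Dict String (List String) :=
  match d.get? (PySem.Str.slice c none (some 5)) with
  | some b => d.insert (PySem.Str.slice c none (some 5)) (b ++ [c])
  | none =>
    match d.get? (PySem.Str.slice c none (some 4)) with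
    | some b => d.insert (PySem.Str.slice c none (some 4)) (b ++ [c])
    | none => d

-- literal port of B: one global sort, one dispatching pass over it, then the dict.
-- As in A's port, the raise branch (geometry bucket empty) returns [].
def wide_feature_columns_from_header_alt (header : List String) : List (String × List String) :=
  let buckets := (PySem.List.sorted header (fun x => x) false).foldl pvDispatch
    (PySem.Dict.ofList [("geom_", []), ("mat_", []), ("sem_", []), ("obj_", [])])
  let geometry := buckets.getD "geom_" []
  if geometry = [] then []
  else
    let material := buckets.getD "mat_" []
    let semantic := buckets.getD "sem_" []
    let object_aware := buckets.getD "obj_" []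
    [("majority_baseline", []),
     ("geometry_only", geometry),
     ("geometry_material", geometry ++ material),
     ("geometry_semantic", geometry ++ semantic),
     ("full_object_aware", geometry ++ material ++ semantic ++ object_aware)]

-- ===== PRECONDITION & SPEC =====
-- Pre_ excludes exactly the headers with no "geom_"-prefixed column, on which
-- Python A raises SemanticAblationError.
def Pre_wide_feature_columns_from_header (header : List String) : Prop :=
  (header.any (fun c => PySem.Str.startswith c "geom_")) = true
instance (header : List String) : Decidable (Pre_wide_feature_columns_from_header header) := by
  unfold Pre_wide_feature_columns_from_header; infer_instance

def pvWitness_wide_feature_columns_from_header : List String :=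
  ["geom_area", "mat_wood", "id", "sem_label", "obj_count", "geom_height"]

def Spec_wide_feature_columns_from_header (header : List String) (out : List (String × List String)) : Prop := out = wide_feature_columns_from_header_alt header
instance (header : List String) (out : List (String × List String)) : Decidable (Spec_wide_feature_columns_from_header header out) := by unfold Spec_wide_feature_columns_from_header; infer_instance

-- ===== CLAIM (what is proved, stated in full; the proofs are below) =====
def Claim_equal_wide_feature_columns_from_header : Prop := ∀ (header : List String), Dom_wide_feature_columns_from_header header → Pre_wide_feature_columns_from_header header → Spec_wide_feature_columns_from_header header (wide_feature_columns_from_header header)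

-- ===== LEMMAS AND PROOFS =====

-- the buckets dict, with its four fixed keys, as a function of the four values
def pvB (g m s o : List String) : PySem.Dict String (List String) :=
  PySem.Dict.ofList [("geom_", g), ("mat_", m), ("sem_", s), ("obj_", o)]
theorem get?_pvB (g m s o : List String) (k : String) :
    (pvB g m s o).get? k =
      if k = "geom_" then some g else if k = "mat_" then some m
      else if k = "sem_" then some s else if k = "obj_" then some o else none := by
  have : pvB g m s o = PySem.Dict.mk [("geom_", g), ("mat_", m), ("sem_", s), ("obj_", o)] := rfl
  rw [this]
  simp only [PySem.Dict.get?_mk_cons]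
  split_ifs <;> simp_all [beq_iff_eq, PySem.Dict.get?]
theorem insert_pvB_geom (g m s o v : List String) : (pvB g m s o).insert "geom_" v = pvB v m s o := by
  have : pvB g m s o = PySem.Dict.mk [("geom_", g), ("mat_", m), ("sem_", s), ("obj_", o)] := rfl
  rw [this]; simp [PySem.Dict.insert, PySem.Dict.contains]; rfl
theorem insert_pvB_mat (g m s o v : List String) : (pvB g m s o).insert "mat_" v = pvB g v s o := by
  have : pvB g m s o = PySem.Dict.mk [("geom_", g), ("mat_", m), ("sem_", s), ("obj_", o)] := rfl
  rw [this]; simp [PySem.Dict.insert, PySem.Dict.contains]; rfl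
theorem insert_pvB_sem (g m s o v : List String) : (pvB g m s o).insert "sem_" v = pvB g m v o := by
  have : pvB g m s o = PySem.Dict.mk [("geom_", g), ("mat_", m), ("sem_", s), ("obj_", o)] := rfl
  rw [this]; simp [PySem.Dict.insert, PySem.Dict.contains]; rfl
theorem insert_pvB_obj (g m s o v : List String) : (pvB g m s o).insert "obj_" v = pvB g m s v := by
  have : pvB g m s o = PySem.Dict.mk [("geom_", g), ("mat_", m), ("sem_", s), ("obj_", o)] := rfl
  rw [this]; simp [PySem.Dict.insert, PySem.Dict.contains]; rfl
theorem slice_toList (c : String) (n : Nat) :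
    (PySem.Str.slice c none (some (n : Int))).toList = List.take n c.toList := by
  simp [PySem.Str.slice, PySem.Chars.slice, PySem.List.slice_to _ (Int.natCast_nonneg n)]
theorem slice_eq_key (c k : String) (n : Nat) (h : k.toList.length = n) :
    (PySem.Str.slice c none (some (n : Int)) = k) ↔ PySem.Str.startswith c k = true := by
  rw [← String.toList_inj, slice_toList]
  rw [show PySem.Str.startswith c k = PySem.Chars.startswith c.toList k.toList from by simp,
    PySem.Chars.startswith_iff]
  constructor
  · intro hh; rw [← hh]; exact List.take_prefix n c.toList
  · intro hh
    have := List.prefix_iff_eq_take.mp hh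
    rw [h] at this; exact this.symm
theorem slice_eq_short (c k : String) (n : Nat) (h : k.toList.length < n) :
    (PySem.Str.slice c none (some (n : Int)) = k) ↔ c = k := by
  rw [← String.toList_inj, slice_toList]
  constructor
  · intro hh
    have hl : (List.take n c.toList).length = k.toList.length := by rw [hh]
    simp only [List.length_take] at hl
    have hle : c.toList.length ≤ n := by omega
    rw [← String.toList_inj]
    rw [List.take_of_length_le hle] at hh; exact hh
  · intro hh; subst hh; exact List.take_of_length_le (by omega)
theorem slice_ne_long (c k : String) (n : Nat) (h : n < k.toList.length) :
    PySem.Str.slice c none (some (n : Int)) ≠ k := by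
  intro hh
  rw [← String.toList_inj, slice_toList] at hh
  have hl : (List.take n c.toList).length = k.toList.length := by rw [hh]
  simp only [List.length_take] at hl
  omega

theorem sw_excl (s : String) (a b : Char) (p q : List Char) (hab : a ≠ b)
    (h : PySem.Chars.startswith s.toList (a :: p) = true) :
    PySem.Chars.startswith s.toList (b :: q) = false := by
  rw [PySem.Chars.startswith_iff] at h
  by_contra hc
  rw [Bool.not_eq_false, PySem.Chars.startswith_iff] at hc
  obtain ⟨t1, ht1⟩ := h
  obtain ⟨t2, ht2⟩ := hc
  rw [← ht1] at ht2
  simp at ht2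
  exact hab ht2.1.symm

theorem dispatch_pvB (g m s o : List String) (c : String) :
    pvDispatch (pvB g m s o) c =
      if PySem.Str.startswith c "geom_" = true then pvB (g ++ [c]) m s o
      else if PySem.Str.startswith c "mat_" = true then pvB g (m ++ [c]) s o
      else if PySem.Str.startswith c "sem_" = true then pvB g m (s ++ [c]) o
      else if PySem.Str.startswith c "obj_" = true then pvB g m s (o ++ [c])
      else pvB g m s o := by
  unfold pvDispatch
  by_cases hg : PySem.Str.startswith c "geom_" = true
  · have hG : PySem.Chars.startswith c.toList ['g','e','o','m','_'] = true := by simpa using hg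
    have h5 : PySem.Str.slice c none (some 5) = "geom_" :=
      (slice_eq_key c "geom_" 5 (by decide)).mpr hg
    rw [h5, get?_pvB]
    simp [hG, insert_pvB_geom]
  · by_cases hcm : c = "mat_"
    · subst hcm
      have e5 : PySem.Str.slice "mat_" none (some 5) = "mat_" := rfl
      rw [e5, get?_pvB]
      simp [insert_pvB_mat,
        show PySem.Chars.startswith ['m','a','t','_'] ['g','e','o','m','_'] = false from by decide,
        show PySem.Chars.startswith ['m','a','t','_'] ['m','a','t','_'] = true from by decide]
    · by_cases hcs : c = "sem_"
      · subst hcs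
        have e5 : PySem.Str.slice "sem_" none (some 5) = "sem_" := rfl
        rw [e5, get?_pvB]
        simp [insert_pvB_sem,
          show PySem.Chars.startswith ['s','e','m','_'] ['g','e','o','m','_'] = false from by decide,
          show PySem.Chars.startswith ['s','e','m','_'] ['m','a','t','_'] = false from by decide,
          show PySem.Chars.startswith ['s','e','m','_'] ['s','e','m','_'] = true from by decide]
      · by_cases hco : c = "obj_"
        · subst hco
          have e5 : PySem.Str.slice "obj_" none (some 5) = "obj_" := rfl
          rw [e5, get?_pvB]
          simp [insert_pvB_obj,
            show PySem.Chars.startswith ['o','b','j','_'] ['g','e','o','m','_'] = false from by decide,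
            show PySem.Chars.startswith ['o','b','j','_'] ['m','a','t','_'] = false from by decide,
            show PySem.Chars.startswith ['o','b','j','_'] ['s','e','m','_'] = false from by decide,
            show PySem.Chars.startswith ['o','b','j','_'] ['o','b','j','_'] = true from by decide]
        · have h5g : PySem.Str.slice c none (some 5) ≠ "geom_" :=
            fun h => hg ((slice_eq_key c "geom_" 5 (by decide)).mp h)
          have h5m : PySem.Str.slice c none (some 5) ≠ "mat_" :=
            fun h => hcm ((slice_eq_short c "mat_" 5 (by decide)).mp h)
          have h5s : PySem.Str.slice c none (some 5) ≠ "sem_" :=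
            fun h => hcs ((slice_eq_short c "sem_" 5 (by decide)).mp h)
          have h5o : PySem.Str.slice c none (some 5) ≠ "obj_" :=
            fun h => hco ((slice_eq_short c "obj_" 5 (by decide)).mp h)
          rw [get?_pvB]
          simp only [h5g, h5m, h5s, h5o, if_false]
          have h4g : PySem.Str.slice c none (some 4) ≠ "geom_" :=
            slice_ne_long c "geom_" 4 (by decide)
          by_cases hm : PySem.Str.startswith c "mat_" = true
          · have h4 : PySem.Str.slice c none (some 4) = "mat_" :=
              (slice_eq_key c "mat_" 4 (by decide)).mpr hm
            have hM : PySem.Chars.startswith c.toList ['m','a','t','_'] = true := by simpa using hm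
            have hG : PySem.Chars.startswith c.toList ['g','e','o','m','_'] = false := by
              simpa using hg
            rw [h4, get?_pvB]
            simp [hG, hM, insert_pvB_mat]
          · have h4m : PySem.Str.slice c none (some 4) ≠ "mat_" :=
              fun h => hm ((slice_eq_key c "mat_" 4 (by decide)).mp h)
            by_cases hs : PySem.Str.startswith c "sem_" = true
            · have h4 : PySem.Str.slice c none (some 4) = "sem_" :=
                (slice_eq_key c "sem_" 4 (by decide)).mpr hs
              have hS : PySem.Chars.startswith c.toList ['s','e','m','_'] = true := by simpa using hs
              have hG : PySem.Chars.startswith c.toList ['g','e','o','m','_'] = false := by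
                simpa using hg
              have hM : PySem.Chars.startswith c.toList ['m','a','t','_'] = false := by
                simpa using hm
              rw [h4, get?_pvB]
              simp [hG, hM, hS, insert_pvB_sem]
            · have h4s : PySem.Str.slice c none (some 4) ≠ "sem_" :=
                fun h => hs ((slice_eq_key c "sem_" 4 (by decide)).mp h)
              by_cases ho : PySem.Str.startswith c "obj_" = true
              · have h4 : PySem.Str.slice c none (some 4) = "obj_" :=
                  (slice_eq_key c "obj_" 4 (by decide)).mpr ho
                have hO : PySem.Chars.startswith c.toList ['o','b','j','_'] = true := by simpa using ho
                have hG : PySem.Chars.startswith c.toList ['g','e','o','m','_'] = false := by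
                  simpa using hg
                have hM : PySem.Chars.startswith c.toList ['m','a','t','_'] = false := by
                  simpa using hm
                have hS : PySem.Chars.startswith c.toList ['s','e','m','_'] = false := by
                  simpa using hs
                rw [h4, get?_pvB]
                simp [hG, hM, hS, hO, insert_pvB_obj]
              · have h4o : PySem.Str.slice c none (some 4) ≠ "obj_" :=
                  fun h => ho ((slice_eq_key c "obj_" 4 (by decide)).mp h)
                have hG : PySem.Chars.startswith c.toList ['g','e','o','m','_'] = false := by
                  simpa using hg
                have hM : PySem.Chars.startswith c.toList ['m','a','t','_'] = false := by
                  simpa using hm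
                have hS : PySem.Chars.startswith c.toList ['s','e','m','_'] = false := by
                  simpa using hs
                have hO : PySem.Chars.startswith c.toList ['o','b','j','_'] = false := by
                  simpa using ho
                rw [get?_pvB]
                simp [hG, hM, hS, hO, h4g, h4m, h4s, h4o]

-- the dispatching pass computes exactly the four prefix filters
theorem fold_dispatch (l : List String) (g m s o : List String) :
    l.foldl pvDispatch (pvB g m s o) =
      pvB (g ++ l.filter (fun c => PySem.Str.startswith c "geom_"))
          (m ++ l.filter (fun c => PySem.Str.startswith c "mat_"))
          (s ++ l.filter (fun c => PySem.Str.startswith c "sem_"))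
          (o ++ l.filter (fun c => PySem.Str.startswith c "obj_")) := by
  induction l generalizing g m s o with
  | nil => simp
  | cons c tl ih =>
    simp only [List.foldl_cons, List.filter_cons, dispatch_pvB]
    by_cases hg : PySem.Str.startswith c "geom_" = true
    · have hm := sw_excl c 'g' 'm' ['e','o','m','_'] ['a','t','_'] (by decide) (by simpa using hg)
      have hs := sw_excl c 'g' 's' ['e','o','m','_'] ['e','m','_'] (by decide) (by simpa using hg)
      have ho := sw_excl c 'g' 'o' ['e','o','m','_'] ['b','j','_'] (by decide) (by simpa using hg)
      simp at hg
      simp [hg, hm, hs, ho, ih]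
    · by_cases hm : PySem.Str.startswith c "mat_" = true
      · have hs := sw_excl c 'm' 's' ['a','t','_'] ['e','m','_'] (by decide) (by simpa using hm)
        have ho := sw_excl c 'm' 'o' ['a','t','_'] ['b','j','_'] (by decide) (by simpa using hm)
        simp at hg hm
        simp [hg, hm, hs, ho, ih]
      · by_cases hs : PySem.Str.startswith c "sem_" = true
        · have ho := sw_excl c 's' 'o' ['e','m','_'] ['b','j','_'] (by decide) (by simpa using hs)
          simp at hg hm hs
          simp [hg, hm, hs, ho, ih]
        · by_cases ho : PySem.Str.startswith c "obj_" = true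
          · simp at hg hm hs ho
            simp [hg, hm, hs, ho, ih]
          · simp at hg hm hs ho
            simp [hg, hm, hs, ho, ih]

-- filtering a sorted list = sorting the filtered list (stability of the global sort)
theorem filter_sorted (l : List String) (p : String → Bool) :
    (PySem.List.sorted l (fun x => x) false).filter p
      = PySem.List.sorted (l.filter p) (fun x => x) false := by
  refine (PySem.List.sorted_id_eq_of_perm_of_pairwise _ _ ?_ ?_).symm
  · exact (PySem.List.sorted_perm l (fun x => x) false).filter p
  · exact ((PySem.List.sorted_pairwise l (fun x => x)).filter p)

-- ===== VERDICT (by name: the statement is the Claim_ definition above) =====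
theorem wide_feature_columns_from_header_spec : Claim_equal_wide_feature_columns_from_header := by
  intro header _ _
  unfold Spec_wide_feature_columns_from_header
  unfold wide_feature_columns_from_header wide_feature_columns_from_header_alt
  have h0 : PySem.Dict.ofList [("geom_", ([] : List String)), ("mat_", []), ("sem_", []), ("obj_", [])] = pvB [] [] [] [] := rfl
  rw [h0, fold_dispatch]
  simp only [List.nil_append, PySem.Dict.getD_eq_get?_getD, get?_pvB, filter_sorted]
  simp
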